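-- pv_equiv track=rewrite | github.com/shine2lay/temper-ai | src/compiler/executors/_parallel_helpers.py | _compute_stage_status
-- ===== SOURCE A (Python) =====
-- from typing import Any, Callable, Dict, Optional, cast
--
-- def _compute_stage_status(agent_statuses: Dict[str, Any]) -> str:
--     """Compute stage status from agent results."""
--     failed_count = sum(1 for s in agent_statuses.values() if s != "success")
--     total_count = len(agent_statuses)
--     if failed_count == total_count and total_count > 0:
--         return "failed"
--     if failed_count > 0:
--         return "degraded"
--     return "completed"
-- ===== SOURCE B (Python) =====
-- def _compute_stage_status(agent_statuses):
--     """Compute stage status from agent results."""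
--     statuses = set(agent_statuses.values())
--     if not statuses:
--         return "completed"
--     if "success" not in statuses:
--         return "failed"
--     if statuses == {"success"}:
--         return "completed"
--     return "degraded"
-- ===== Notes on version B (the rewrite author's own statement) =====
-- stated objective: simpler
-- what changed: B builds the set of distinct status values once and decides by membership/set-equality, instead of counting failures and comparing the count to the dict size.
import Mathlib
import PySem

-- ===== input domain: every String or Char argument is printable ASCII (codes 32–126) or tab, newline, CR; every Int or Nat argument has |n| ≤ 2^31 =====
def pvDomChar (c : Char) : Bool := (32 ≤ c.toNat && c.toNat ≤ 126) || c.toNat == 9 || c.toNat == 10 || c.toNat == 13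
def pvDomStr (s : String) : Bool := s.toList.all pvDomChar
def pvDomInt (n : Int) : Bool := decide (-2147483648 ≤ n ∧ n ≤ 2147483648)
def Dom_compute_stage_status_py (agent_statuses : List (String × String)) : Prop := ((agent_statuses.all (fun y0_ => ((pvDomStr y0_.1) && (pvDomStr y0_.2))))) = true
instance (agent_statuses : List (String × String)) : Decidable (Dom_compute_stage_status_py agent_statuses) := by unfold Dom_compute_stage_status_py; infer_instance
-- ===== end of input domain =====

-- B replaces A's failure count with the set of distinct status values, decided by membership/equality (objective: simpler).

-- ===== PORT A =====
-- sum(1 for s in agent_statuses.values() if s != "success"); len(agent_statuses); the if-chain.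
def compute_stage_status_py (agent_statuses : List (String × String)) : String :=
  let d := PySem.Dict.ofList agent_statuses
  let failed_count : Int := d.values.foldl (fun acc s => if s ≠ "success" then acc + 1 else acc) 0
  let total_count : Int := d.size
  if failed_count = total_count ∧ total_count > 0 then "failed"
  else if failed_count > 0 then "degraded"
  else "completed"

-- ===== PORT B =====
-- statuses = set(agent_statuses.values()); decide by emptiness / membership / set equality.
def compute_stage_status_py_alt (agent_statuses : List (String × String)) : String :=
  let statuses : PySem.Set String := PySem.Set.ofList (PySem.Dict.ofList agent_statuses).values
  if statuses = [] then "completed"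
  else if ¬ ("success" ∈ statuses) then "failed"
  else if PySem.Set.equal statuses (PySem.Set.ofList ["success"]) then "completed"
  else "degraded"

-- ===== PRECONDITION & SPEC =====
def Spec_compute_stage_status_py (agent_statuses : List (String × String)) (out : String) : Prop := out = compute_stage_status_py_alt agent_statuses
instance (agent_statuses : List (String × String)) (out : String) : Decidable (Spec_compute_stage_status_py agent_statuses out) := by unfold Spec_compute_stage_status_py; infer_instance

-- ===== CLAIM (what is proved, stated in full; the proofs are below) =====
def Claim_equal_compute_stage_status_py : Prop := ∀ (agent_statuses : List (String × String)), Dom_compute_stage_status_py agent_statuses → Spec_compute_stage_status_py agent_statuses (compute_stage_status_py agent_statuses)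

-- ===== LEMMAS AND PROOFS =====

-- The failure-count fold is List.countP over the values.
theorem pv_fold_countP (vals : List String) (c : Int) :
    vals.foldl (fun acc s => if s ≠ "success" then acc + 1 else acc) c
      = c + (vals.countP (fun s => s ≠ "success") : Int) := by
  induction vals generalizing c with
  | nil => simp
  | cons x xs ih =>
    simp only [List.foldl_cons, List.countP_cons, ih]
    by_cases h : x = "success"
    · simp [h]
    · simp [h]; ring

theorem pv_ofList_eq_nil {α : Type} [BEq α] [LawfulBEq α] (xs : List α) :
    PySem.Set.ofList xs = [] ↔ xs = [] := by
  constructor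
  · intro h
    cases xs with
    | nil => rfl
    | cons y ys =>
      have hy : y ∈ PySem.Set.ofList (y :: ys) := (PySem.Set.mem_ofList _ _).2 (by simp)
      rw [h] at hy
      simp at hy
  · intro h; subst h; rfl

-- The core case analysis, stated over an arbitrary values list.
theorem pv_main (vals : List String) :
    (let failed_count : Int := vals.foldl (fun acc s => if s ≠ "success" then acc + 1 else acc) 0
     let total_count : Int := vals.length
     if failed_count = total_count ∧ total_count > 0 then "failed"
     else if failed_count > 0 then "degraded"
     else "completed")
    =
    (let statuses : PySem.Set String := PySem.Set.ofList vals
     if statuses = [] then "completed"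
     else if ¬ ("success" ∈ statuses) then "failed"
     else if PySem.Set.equal statuses (PySem.Set.ofList ["success"]) then "completed"
     else "degraded") := by
  simp only [pv_fold_countP, zero_add]
  by_cases hempty : vals = []
  · subst hempty; decide
  · have hlen : 0 < vals.length := List.length_pos_iff.mpr hempty
    have hset : ¬ (PySem.Set.ofList vals = []) := fun h => hempty ((pv_ofList_eq_nil vals).1 h)
    rw [if_neg hset]
    by_cases hs : "success" ∈ vals
    · -- success occurs: the first branch of A is off
      have hms : "success" ∈ PySem.Set.ofList vals := (PySem.Set.mem_ofList _ _).2 hs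
      rw [if_neg (not_not_intro hms)]
      have hclt : vals.countP (fun s => s ≠ "success") < vals.length := by
        refine lt_of_le_of_ne List.countP_le_length ?_
        intro h
        have h2 := (List.countP_eq_length).1 h "success" hs
        simp at h2
      have hA1 : ¬ ((vals.countP (fun s => s ≠ "success") : Int) = (vals.length : Int) ∧ (vals.length : Int) > 0) := by
        rintro ⟨h, -⟩; omega
      rw [if_neg hA1]
      by_cases hall : ∀ x ∈ vals, x = "success"
      · -- all success: count 0, set = {"success"}
        have hc0 : vals.countP (fun s => s ≠ "success") = 0 := by
          rw [List.countP_eq_zero]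
          intro a ha; simpa using hall a ha
        have hA2 : ¬ ((vals.countP (fun s => s ≠ "success") : Int) > 0) := by omega
        rw [if_neg hA2]
        have heq : PySem.Set.equal (PySem.Set.ofList vals) (PySem.Set.ofList ["success"]) = true := by
          rw [PySem.Set.equal_iff]
          intro x
          simp only [PySem.Set.mem_ofList, List.mem_singleton]
          exact ⟨fun hx => hall x hx, fun hx => hx ▸ hs⟩
        rw [if_pos heq]
      · -- some failure and some success: degraded
        push_neg at hall
        obtain ⟨b, hb, hbne⟩ := hall
        have hcpos : 0 < vals.countP (fun s => s ≠ "success") :=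
          List.countP_pos_iff.2 ⟨b, hb, by simpa using hbne⟩
        have hA2 : (vals.countP (fun s => s ≠ "success") : Int) > 0 := by exact_mod_cast hcpos
        rw [if_pos hA2]
        have hneq : ¬ (PySem.Set.equal (PySem.Set.ofList vals) (PySem.Set.ofList ["success"]) = true) := by
          rw [PySem.Set.equal_iff]
          intro h
          have hbmem : b ∈ PySem.Set.ofList vals := (PySem.Set.mem_ofList _ _).2 hb
          have := (h b).1 hbmem
          simp only [PySem.Set.mem_ofList, List.mem_singleton] at this
          exact hbne this
        rw [if_neg hneq]
    · -- no success at all: all fail, both sides "failed"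
      have hms : ¬ ("success" ∈ PySem.Set.ofList vals) := fun h => hs ((PySem.Set.mem_ofList _ _).1 h)
      rw [if_pos hms]
      have hcall : vals.countP (fun s => s ≠ "success") = vals.length := by
        rw [List.countP_eq_length]
        intro a ha
        simp only [ne_eq, decide_eq_true_eq]
        intro h
        exact hs (h ▸ ha)
      have hA1 : (vals.countP (fun s => s ≠ "success") : Int) = (vals.length : Int) ∧ (vals.length : Int) > 0 :=
        ⟨by omega, by omega⟩
      rw [if_pos hA1]

-- ===== VERDICT (by name: the statement is the Claim_ definition above) =====
theorem compute_stage_status_py_spec : Claim_equal_compute_stage_status_py := by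
  intro agent_statuses _
  unfold Spec_compute_stage_status_py compute_stage_status_py compute_stage_status_py_alt
  have h := pv_main (PySem.Dict.ofList agent_statuses).values
  simpa [PySem.Dict.size, PySem.Dict.values] using h
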